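-- pv_equiv track=rewrite | github.com/jeremysule/hackerrank_python | algorithms/implementation/EmaSupercomputer.py | plusesCompatible
-- ===== SOURCE A (Python) =====
-- def plusesCompatible(i1,j1,lb1, i2,j2,lb2):
--     areaBy1 = [(a,b) for a in range(i1-lb1, i1+lb1+1) for b in range(j1-lb1, j1+lb1+1) if a == i1 or b ==j1]
--     assert len(areaBy1) == 1 + lb1*4
--     areaBy2 = [(a,b) for a in range(i2-lb2, i2+lb2+1) for b in range(j2-lb2, j2+lb2+1) if a == i2 or b == j2]
--     assert len(areaBy2) == 1 + lb2*4
--     intersection = set(areaBy1) & set(areaBy2)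
--     if len(intersection) ==0:
--         return True
--     return False
-- ===== SOURCE B (Python) =====
-- def plusesCompatible(i1, j1, lb1, i2, j2, lb2):
--     # O(1) geometric test: the two pluses are unions of a horizontal and a
--     # vertical segment; they intersect iff one of the four segment pairs meets.
--     di = abs(i1 - i2)
--     dj = abs(j1 - j2)
--     hit = ((i1 == i2 and dj <= lb1 + lb2)
--            or (j1 == j2 and di <= lb1 + lb2)
--            or (di <= lb2 and dj <= lb1)
--            or (di <= lb1 and dj <= lb2))
--     return not hit
-- ===== Notes on version B (the rewrite author's own statement) =====
-- stated objective: faster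
-- what changed: Replaced enumerating all O(lb^2) grid cells and a set intersection with a constant-time geometric overlap test on the four horizontal/vertical segment pairs.
import Mathlib
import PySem

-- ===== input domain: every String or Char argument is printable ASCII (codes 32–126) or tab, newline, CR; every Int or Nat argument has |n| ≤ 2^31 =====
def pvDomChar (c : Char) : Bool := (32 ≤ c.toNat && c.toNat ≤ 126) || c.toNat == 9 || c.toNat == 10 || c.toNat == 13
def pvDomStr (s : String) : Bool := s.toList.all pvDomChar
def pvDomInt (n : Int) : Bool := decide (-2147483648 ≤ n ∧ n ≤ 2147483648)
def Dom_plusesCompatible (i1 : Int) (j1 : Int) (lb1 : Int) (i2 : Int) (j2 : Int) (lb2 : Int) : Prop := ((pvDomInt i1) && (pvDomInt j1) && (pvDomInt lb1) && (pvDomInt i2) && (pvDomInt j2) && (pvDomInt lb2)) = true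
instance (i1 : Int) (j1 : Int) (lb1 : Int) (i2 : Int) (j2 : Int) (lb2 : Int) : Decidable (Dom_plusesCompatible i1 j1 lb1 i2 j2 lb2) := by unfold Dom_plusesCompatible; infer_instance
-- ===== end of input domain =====

-- B replaces A's O(lb^2) cell enumeration + set intersection by an O(1) geometric
-- test on the four horizontal/vertical segment pairs of the two pluses.

-- ===== PORT A =====
-- the list comprehension [(a,b) for a in range(...) for b in range(...) if a==i or b==j]
def pvCross (i : Int) (j : Int) (lb : Int) : List (Int × Int) :=
  (PySem.List.pyRange (i - lb) (i + lb + 1) 1).flatMap (fun a =>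
    ((PySem.List.pyRange (j - lb) (j + lb + 1) 1).filter (fun b => a == i || b == j)).map
      (fun b => (a, b)))

def plusesCompatible (i1 : Int) (j1 : Int) (lb1 : Int) (i2 : Int) (j2 : Int) (lb2 : Int) : Bool :=
  let areaBy1 := pvCross i1 j1 lb1
  let areaBy2 := pvCross i2 j2 lb2
  let intersection := PySem.Set.inter (PySem.Set.ofList areaBy1) (PySem.Set.ofList areaBy2)
  if PySem.Set.len intersection == 0 then true else false

-- ===== PORT B =====
def plusesCompatible_alt (i1 : Int) (j1 : Int) (lb1 : Int) (i2 : Int) (j2 : Int) (lb2 : Int) : Bool :=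
  let di := |i1 - i2|
  let dj := |j1 - j2|
  let hit := (i1 == i2 && decide (dj ≤ lb1 + lb2))
          || (j1 == j2 && decide (di ≤ lb1 + lb2))
          || (decide (di ≤ lb2) && decide (dj ≤ lb1))
          || (decide (di ≤ lb1) && decide (dj ≤ lb2))
  !hit

-- ===== PRECONDITION & SPEC =====
-- A asserts len(area) == 1 + 4*lb; for a negative arm length the comprehension is
-- shorter than that, so A raises AssertionError: Pre_ requires both arm lengths ≥ 0.
def Pre_plusesCompatible (i1 : Int) (j1 : Int) (lb1 : Int) (i2 : Int) (j2 : Int) (lb2 : Int) : Prop :=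
  0 ≤ lb1 ∧ 0 ≤ lb2
instance (i1 : Int) (j1 : Int) (lb1 : Int) (i2 : Int) (j2 : Int) (lb2 : Int) : Decidable (Pre_plusesCompatible i1 j1 lb1 i2 j2 lb2) := by unfold Pre_plusesCompatible; infer_instance

def pvWitness_plusesCompatible : Int × Int × Int × Int × Int × Int := (0, 0, 1, 2, 2, 1)

def Spec_plusesCompatible (i1 : Int) (j1 : Int) (lb1 : Int) (i2 : Int) (j2 : Int) (lb2 : Int) (out : Bool) : Prop := out = plusesCompatible_alt i1 j1 lb1 i2 j2 lb2
instance (i1 : Int) (j1 : Int) (lb1 : Int) (i2 : Int) (j2 : Int) (lb2 : Int) (out : Bool) : Decidable (Spec_plusesCompatible i1 j1 lb1 i2 j2 lb2 out) := by unfold Spec_plusesCompatible; infer_instance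

-- ===== CLAIM (what is proved, stated in full; the proofs are below) =====
def Claim_equal_plusesCompatible : Prop := ∀ (i1 : Int) (j1 : Int) (lb1 : Int) (i2 : Int) (j2 : Int) (lb2 : Int), Dom_plusesCompatible i1 j1 lb1 i2 j2 lb2 → Pre_plusesCompatible i1 j1 lb1 i2 j2 lb2 → Spec_plusesCompatible i1 j1 lb1 i2 j2 lb2 (plusesCompatible i1 j1 lb1 i2 j2 lb2)
-- ===== LEMMAS AND PROOFS =====

-- membership in the comprehension list, as a closed arithmetic condition
theorem mem_pvCross (i j lb a b : Int) :
    (a, b) ∈ pvCross i j lb ↔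
      (i - lb ≤ a ∧ a < i + lb + 1 ∧ j - lb ≤ b ∧ b < j + lb + 1 ∧ (a = i ∨ b = j)) := by
  simp only [pvCross, List.mem_flatMap, List.mem_map, List.mem_filter,
    PySem.List.mem_pyRange_one, Bool.or_eq_true, beq_iff_eq, Prod.mk.injEq]
  constructor
  · rintro ⟨x, hx, y, ⟨⟨hy1, hy2⟩, hd⟩, he1, he2⟩
    subst he1; subst he2
    exact ⟨hx.1, hx.2, hy1, hy2, hd⟩
  · rintro ⟨h1, h2, h3, h4, h5⟩
    exact ⟨a, ⟨h1, h2⟩, b, ⟨⟨h3, h4⟩, h5⟩, rfl, rfl⟩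

-- intersection of the two crosses is empty iff no pair of the four segments meets
theorem cross_inter_iff (i1 j1 lb1 i2 j2 lb2 : Int) (h1 : 0 ≤ lb1) (h2 : 0 ≤ lb2) :
    (∃ p, p ∈ pvCross i1 j1 lb1 ∧ p ∈ pvCross i2 j2 lb2) ↔
      ((i1 = i2 ∧ |j1 - j2| ≤ lb1 + lb2) ∨ (j1 = j2 ∧ |i1 - i2| ≤ lb1 + lb2) ∨
       (|i1 - i2| ≤ lb2 ∧ |j1 - j2| ≤ lb1) ∨ (|i1 - i2| ≤ lb1 ∧ |j1 - j2| ≤ lb2)) := by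
  simp only [abs_le]
  constructor
  · rintro ⟨⟨a, b⟩, hp, hq⟩
    rw [mem_pvCross] at hp hq
    obtain ⟨p1, p2, p3, p4, p5⟩ := hp
    obtain ⟨q1, q2, q3, q4, q5⟩ := hq
    rcases p5 with h | h <;> rcases q5 with h' | h'
    · left; omega
    · right; right; left; omega
    · right; right; right; omega
    · right; left; omega
  · rintro (⟨he, hd⟩ | ⟨he, hd⟩ | ⟨ha, hb⟩ | ⟨ha, hb⟩)
    · by_cases hc : j1 - lb1 ≤ j2 - lb2
      · exact ⟨(i1, j2 - lb2), (mem_pvCross ..).2 (by omega), (mem_pvCross ..).2 (by omega)⟩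
      · exact ⟨(i1, j1 - lb1), (mem_pvCross ..).2 (by omega), (mem_pvCross ..).2 (by omega)⟩
    · by_cases hc : i1 - lb1 ≤ i2 - lb2
      · exact ⟨(i2 - lb2, j1), (mem_pvCross ..).2 (by omega), (mem_pvCross ..).2 (by omega)⟩
      · exact ⟨(i1 - lb1, j1), (mem_pvCross ..).2 (by omega), (mem_pvCross ..).2 (by omega)⟩
    · exact ⟨(i1, j2), (mem_pvCross ..).2 (by omega), (mem_pvCross ..).2 (by omega)⟩
    · exact ⟨(i2, j1), (mem_pvCross ..).2 (by omega), (mem_pvCross ..).2 (by omega)⟩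

theorem inter_nil_iff {α : Type} [BEq α] [LawfulBEq α] (xs ys : List α) :
    PySem.Set.inter (PySem.Set.ofList xs) (PySem.Set.ofList ys) = [] ↔
      ¬ ∃ p, p ∈ xs ∧ p ∈ ys := by
  rw [List.eq_nil_iff_forall_not_mem]
  constructor
  · rintro h ⟨p, hx, hy⟩
    exact h p ((PySem.Set.mem_inter ..).2
      ⟨(PySem.Set.mem_ofList ..).2 hx, (PySem.Set.mem_ofList ..).2 hy⟩)
  · intro h p hp
    rw [PySem.Set.mem_inter, PySem.Set.mem_ofList, PySem.Set.mem_ofList] at hp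
    exact h ⟨p, hp⟩

-- ===== VERDICT (by name: the statement is the Claim_ definition above) =====
set_option maxHeartbeats 1000000 in
theorem plusesCompatible_spec : Claim_equal_plusesCompatible := by
  intro i1 j1 lb1 i2 j2 lb2 _ hpre
  obtain ⟨h1, h2⟩ := hpre
  have hkey := cross_inter_iff i1 j1 lb1 i2 j2 lb2 h1 h2
  have hempty := inter_nil_iff (pvCross i1 j1 lb1) (pvCross i2 j2 lb2)
  unfold Spec_plusesCompatible plusesCompatible plusesCompatible_alt
  show (if PySem.Set.len (PySem.Set.inter (PySem.Set.ofList (pvCross i1 j1 lb1))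
          (PySem.Set.ofList (pvCross i2 j2 lb2))) == 0 then true else false)
      = !((i1 == i2 && decide (|j1 - j2| ≤ lb1 + lb2))
          || (j1 == j2 && decide (|i1 - i2| ≤ lb1 + lb2))
          || (decide (|i1 - i2| ≤ lb2) && decide (|j1 - j2| ≤ lb1))
          || (decide (|i1 - i2| ≤ lb1) && decide (|j1 - j2| ≤ lb2)))
  generalize hs : PySem.Set.inter (PySem.Set.ofList (pvCross i1 j1 lb1))
      (PySem.Set.ofList (pvCross i2 j2 lb2)) = s
  rw [hs] at hempty
  by_cases hi : ∃ p, p ∈ pvCross i1 j1 lb1 ∧ p ∈ pvCross i2 j2 lb2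
  · have hne : s ≠ [] := fun h => hempty.1 h hi
    have hlen : (PySem.Set.len s == 0) = false := by
      cases s with
      | nil => exact absurd rfl hne
      | cons x xs => simp [PySem.Set.len]; omega
    rw [hlen]
    have hhit : ((i1 == i2 && decide (|j1 - j2| ≤ lb1 + lb2))
          || (j1 == j2 && decide (|i1 - i2| ≤ lb1 + lb2))
          || (decide (|i1 - i2| ≤ lb2) && decide (|j1 - j2| ≤ lb1))
          || (decide (|i1 - i2| ≤ lb1) && decide (|j1 - j2| ≤ lb2))) = true := by
      rcases hkey.1 hi with ⟨he, hd⟩ | ⟨he, hd⟩ | ⟨he, hd⟩ | ⟨he, hd⟩ <;> simp [he, hd]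
    rw [hhit]
    rfl
  · have hnil : s = [] := hempty.2 hi
    subst hnil
    have hhit : ((i1 == i2 && decide (|j1 - j2| ≤ lb1 + lb2))
          || (j1 == j2 && decide (|i1 - i2| ≤ lb1 + lb2))
          || (decide (|i1 - i2| ≤ lb2) && decide (|j1 - j2| ≤ lb1))
          || (decide (|i1 - i2| ≤ lb1) && decide (|j1 - j2| ≤ lb2))) = false := by
      by_contra hc
      simp only [Bool.not_eq_false, Bool.or_eq_true, Bool.and_eq_true, beq_iff_eq,
        decide_eq_true_eq] at hc
      exact hi (hkey.2 (by tauto))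
    rw [hhit]
    rfl
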